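-- pv_equiv track=rewrite | github.com/sabrinatseng/aoc-2025-python | 06.py | part_two
-- ===== SOURCE A (Python) =====
-- def evaluate(op, nums):
--     if op == "+":
--         return sum(nums)
--     if op == "*":
--         prod = 1
--         for num in nums:
--             prod *= num
--         return prod
--
-- def part_two(input):
--     lines = input.splitlines()
--
--     total_sum = 0
--
--     # Assume all lines of input are the same length l
--     l = len(lines[0])
--
--     # Running list of numbers that have been read but not evaluated yet
--     buffer = []
--
--     for i in reversed(range(0, l)):
--         # read down the column
--         col = "".join([lines[j][i] for j in range(len(lines))])
--
--         # parse the number by ignoring all non-digit characters, and add to buffer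
--         digits = "".join([c for c in col if c.isdigit()])
--         if digits:
--             buffer.append(int(digits))
--
--         if col[-1] in ('+', '*'):
--             # evaluate and add to total
--             total_sum += evaluate(col[-1], buffer)
--             # reset buffer
--             buffer = []
--
--     return total_sum
-- ===== SOURCE B (Python) =====
-- def part_two(input):
--     lines = input.splitlines()
--
--     # Stage 1: parse every column into (number-or-None, bottom char).
--     cols = []
--     for i in range(len(lines[0])):
--         chars = [line[i] for line in lines]
--         digits = [c for c in chars if c.isdigit()]
--         cols.append((int("".join(digits)) if digits else None, chars[-1]))
--
--     # Stage 2: locate the operator columns; each operator owns the slice of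
--     # columns from itself up to (excluding) the next operator to its right.
--     # Columns left of the first operator belong to no slice and are ignored.
--     ops = [(i, last) for i, (_, last) in enumerate(cols) if last in "+*"]
--     starts = [i for i, _ in ops]
--
--     # Stage 3: evaluate each slice independently and add up the results.
--     total = 0
--     for (i, op), j in zip(ops, starts[1:] + [len(cols)]):
--         nums = [n for n, _ in cols[i:j] if n is not None]
--         if op == "+":
--             total += sum(nums)
--         else:
--             prod = 1
--             for n in nums:
--                 prod *= n
--             total += prod
--     return total
-- ===== Notes on version B (the rewrite author's own statement) =====
-- stated objective: alternative
-- what changed: A's single right-to-left scan with a buffer that is evaluated and reset at each operator column is replaced by a staged, index-based algorithm: parse all columns, list the operator column positions, pair each operator with the position of the next operator (or the end), and evaluate each such slice of columns independently, summing the results; columns left of the first operator fall in no slice, matching A's never-flushed leftover buffer.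
import Mathlib
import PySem

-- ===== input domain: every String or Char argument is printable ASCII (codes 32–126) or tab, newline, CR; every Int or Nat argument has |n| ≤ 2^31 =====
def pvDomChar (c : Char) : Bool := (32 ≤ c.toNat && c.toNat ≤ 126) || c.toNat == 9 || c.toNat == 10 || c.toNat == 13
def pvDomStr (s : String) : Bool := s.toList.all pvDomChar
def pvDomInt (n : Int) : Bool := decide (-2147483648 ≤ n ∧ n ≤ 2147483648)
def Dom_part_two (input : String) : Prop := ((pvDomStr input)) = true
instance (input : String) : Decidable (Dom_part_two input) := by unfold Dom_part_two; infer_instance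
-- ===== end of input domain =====

-- B replaces A's right-to-left buffer-and-reset scan by a staged, index-based algorithm:
-- parse all columns, list the operator column positions, pair each with the next operator
-- position (or the end), and evaluate each slice independently (objective: alternative).

-- ===== PORT A =====
-- helper 'evaluate' from A; Python returns None for any other op, but the call site
-- guards op ∈ {'+', '*'}, so the 0 default is never reached.
def pvEvaluate (op : Char) (nums : List Int) : Int :=
  if op = '+' then nums.sum
  else if op = '*' then nums.foldl (fun prod num => prod * num) 1
  else 0

def part_two (input : String) : Int :=
  let lines := PySem.Str.splitlines input
  -- lines[0] raises IndexError when lines = []; excluded by Pre_ (default never reached inside Pre_)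
  let l : Int := PySem.Str.len (PySem.List.pyGetD lines 0 "")
  let r :=
    ((PySem.List.pyRange 0 l 1).reverse).foldl
      (fun (st : Int × List Int) (i : Int) =>
        -- lines[j][i] raises IndexError on ragged input; excluded by Pre_
        let col : List Char := (PySem.List.pyRange 0 (lines.length : Int) 1).map
          (fun j => PySem.List.pyGetD (PySem.List.pyGetD lines j "").toList i ' ')
        let digits : List Char := col.filter (fun c => PySem.Chars.isdigit c)
        -- int(digits): digits is a nonempty all-digit string here, so ofChars? is some; .getD 0 unreachable
        let buffer : List Int :=
          if digits ≠ [] then st.2 ++ [(PySem.Int.ofChars? digits).getD 0] else st.2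
        let last : Char := PySem.List.pyGetD col (-1) ' '
        if last = '+' ∨ last = '*' then (st.1 + pvEvaluate last buffer, ([] : List Int))
        else (st.1, buffer))
      ((0 : Int), ([] : List Int))
  r.1

-- ===== PORT B =====
def part_two_alt (input : String) : Int :=
  let lines := PySem.Str.splitlines input
  -- stage 1: parse each column into (number-or-None, bottom character)
  let cols : List (Option Int × Char) :=
    (PySem.List.pyRange 0 (PySem.Str.len (PySem.List.pyGetD lines 0 "")) 1).map
      (fun i =>
        let chars : List Char := lines.map (fun line => PySem.List.pyGetD line.toList i ' ')
        let digits : List Char := chars.filter (fun c => PySem.Chars.isdigit c)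
        ((if digits ≠ [] then some ((PySem.Int.ofChars? digits).getD 0) else none),
         PySem.List.pyGetD chars (-1) ' '))
  -- stage 2: operator columns with their positions, and segment start positions
  let ops : List (Int × Char) :=
    (PySem.List.enumerate cols 0).filterMap
      (fun p => if p.2.2 = '+' ∨ p.2.2 = '*' then some (p.1, p.2.2) else none)
  let starts : List Int := ops.map (fun q => q.1)
  -- stage 3: evaluate each slice cols[i:j] independently, summing the results
  (ops.zip (starts.drop 1 ++ [(cols.length : Int)])).foldl
    (fun (total : Int) (q : (Int × Char) × Int) =>
      let nums : List Int :=
        (PySem.List.slice cols (some q.1.1) (some q.2)).filterMap (fun c => c.1)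
      if q.1.2 = '+' then total + nums.sum
      else total + nums.foldl (fun prod n => prod * n) 1)
    0

-- ===== PRECONDITION & SPEC =====
-- Pre_ excludes exactly the inputs where Python A raises IndexError: no lines at all
-- (lines[0]), or a line shorter than the first line (lines[j][i]).
def Pre_part_two (input : String) : Prop :=
  PySem.Str.splitlines input ≠ [] ∧
  ∀ line ∈ PySem.Str.splitlines input,
    ((PySem.Str.splitlines input).headD "").toList.length ≤ line.toList.length

instance (input : String) : Decidable (Pre_part_two input) := by
  unfold Pre_part_two; infer_instance

def pvWitness_part_two : String := "1\n+"

def Spec_part_two (input : String) (out : Int) : Prop := out = part_two_alt input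
instance (input : String) (out : Int) : Decidable (Spec_part_two input out) := by
  unfold Spec_part_two; infer_instance

-- ===== CLAIM (what is proved, stated in full; the proofs are below) =====
def Claim_equal_part_two : Prop :=
  ∀ (input : String), Dom_part_two input → Pre_part_two input →
    Spec_part_two input (part_two input)

-- ===== LEMMAS AND PROOFS =====

-- the parsed information of column i (exactly stage 1 of B)
def pvColInfo (lines : List String) (i : Int) : Option Int × Char :=
  let chars : List Char := lines.map (fun line => PySem.List.pyGetD line.toList i ' ')
  let digits : List Char := chars.filter (fun c => PySem.Chars.isdigit c)
  ((if digits ≠ [] then some ((PySem.Int.ofChars? digits).getD 0) else none),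
   PySem.List.pyGetD chars (-1) ' ')

-- A's loop body as a function of the parsed column
def pvStepA (st : Int × List Int) (c : Option Int × Char) : Int × List Int :=
  let buffer := match c.1 with | some n => st.2 ++ [n] | none => st.2
  if c.2 = '+' ∨ c.2 = '*' then (st.1 + pvEvaluate c.2 buffer, ([] : List Int))
  else (st.1, buffer)

-- "this column is not an operator column" (segment-continuation predicate)
def pvNop (c : Option Int × Char) : Bool := !(c.2 == '+' || c.2 == '*')

-- evaluation of a segment's numbers by the segment's operator
def pvEvalB (op : Char) (l : List Int) : Int := if op = '+' then l.sum else l.prod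

-- the common specification: total of the segments, leftmost unfinished group discarded
def pvSegTot : List (Option Int × Char) → Int
  | [] => 0
  | c :: cs =>
    if c.2 = '+' ∨ c.2 = '*' then
      pvEvalB c.2 ((c :: cs.takeWhile pvNop).filterMap (fun d => d.1))
        + pvSegTot (cs.dropWhile pvNop)
    else pvSegTot cs
termination_by cs => cs.length
decreasing_by
· exact Nat.lt_succ_of_le (List.length_dropWhile_le ..)
· simp

-- operator columns with their (Nat) positions
def pvOps : List (Option Int × Char) → List (Nat × Char)
  | [] => []
  | c :: cs =>
    if c.2 = '+' ∨ c.2 = '*' then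
      (0, c.2) :: (pvOps cs).map (fun q => (q.1 + 1, q.2))
    else (pvOps cs).map (fun q => (q.1 + 1, q.2))

-- segment end bounds and the per-segment value (all-Nat model of B's stage 3)
def pvBounds (cs : List (Option Int × Char)) : List Nat :=
  ((pvOps cs).map (fun q => q.1)).drop 1 ++ [cs.length]

def pvTerm (cs : List (Option Int × Char)) (q : (Nat × Char) × Nat) : Int :=
  pvEvalB q.1.2 (((cs.drop q.1.1).take (q.2 - q.1.1)).filterMap (fun d => d.1))

def pvPairSum (cs : List (Option Int × Char)) : Int :=
  (((pvOps cs).zip (pvBounds cs)).map (pvTerm cs)).sum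

-- foldl of multiplication is the product
lemma pvFoldProd (l : List Int) : l.foldl (fun prod n => prod * n) 1 = l.prod :=
  (List.prod_eq_foldl).symm

-- pvEvalB is invariant under permutation
lemma pvEvalB_perm (op : Char) {l l' : List Int} (h : l.Perm l') :
    pvEvalB op l = pvEvalB op l' := by
  unfold pvEvalB; rw [h.sum_eq, h.prod_eq]

-- skipping leading non-operator columns does not change the total
lemma pvSegTot_dropWhile (cs : List (Option Int × Char)) :
    pvSegTot (cs.dropWhile pvNop) = pvSegTot cs := by
  induction cs with
  | nil => rfl
  | cons c cs ih =>
    by_cases h : c.2 = '+' ∨ c.2 = '*'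
    · have : pvNop c = false := by unfold pvNop; rcases h with h | h <;> simp [h]
      simp only [List.dropWhile_cons, this]
      simp
    · have : pvNop c = true := by
        unfold pvNop; simp only [not_or] at h; simp [h.1, h.2]
      simp only [List.dropWhile_cons, this, if_pos trivial]
      conv_rhs => rw [pvSegTot]
      simpa [h] using ih

-- the first operator position (or the length) is the length of the leading non-operator run
lemma pvFirst_eq (cs : List (Option Int × Char)) :
    ((pvOps cs).map (fun q => q.1) ++ [cs.length]).headD 0
      = (cs.takeWhile pvNop).length := by
  induction cs with
  | nil => rfl
  | cons c cs ih =>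
    by_cases h : c.2 = '+' ∨ c.2 = '*'
    · have hn : pvNop c = false := by unfold pvNop; rcases h with h | h <;> simp [h]
      simp [pvOps, h, hn]
    · have hn : pvNop c = true := by
        unfold pvNop; simp only [not_or] at h; simp [h.1, h.2]
      simp only [pvOps, if_neg h, List.takeWhile_cons, hn, if_pos trivial]
      cases hops : pvOps cs with
      | nil => simp [hops] at ih ⊢; omega
      | cons q qs => simp [hops] at ih ⊢; omega

-- hence taking up to it yields exactly that run
lemma pvTake_first (cs : List (Option Int × Char)) :
    cs.take (((pvOps cs).map (fun q => q.1) ++ [cs.length]).headD 0)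
      = cs.takeWhile pvNop := by
  rw [pvFirst_eq]
  exact ((List.prefix_iff_eq_take).1 (List.takeWhile_prefix pvNop)).symm

-- on an operator the two evaluators agree
lemma pvEvaluate_eq (op : Char) (h : op = '+' ∨ op = '*') (l : List Int) :
    pvEvaluate op l = pvEvalB op l := by
  rcases h with h | h <;> simp [pvEvaluate, pvEvalB, h, pvFoldProd]

-- A's fold (in foldr form) computes pvSegTot, carrying the reversed pending buffer
lemma pvFoldrA (cs : List (Option Int × Char)) :
    cs.foldr (fun c st => pvStepA st c) ((0 : Int), ([] : List Int))
      = (pvSegTot cs, ((cs.takeWhile pvNop).filterMap (fun d => d.1)).reverse) := by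
  induction cs with
  | nil => simp [pvSegTot]
  | cons c cs ih =>
    obtain ⟨n?, ch⟩ := c
    rw [List.foldr_cons, ih]
    by_cases h : ch = '+' ∨ ch = '*'
    · have hn : pvNop (n?, ch) = false := by
        unfold pvNop; rcases h with h | h <;> simp [h]
      have hseg : pvSegTot ((n?, ch) :: cs)
          = pvEvalB ch (((n?, ch) :: cs.takeWhile pvNop).filterMap (fun d => d.1))
            + pvSegTot cs := by
        rw [pvSegTot, if_pos h, pvSegTot_dropWhile]
      cases n? with
      | some n =>
        have hp : ((((cs.takeWhile pvNop).filterMap (fun d => d.1)).reverse ++ [n]).Perm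
            (((some n, ch) :: cs.takeWhile pvNop).filterMap (fun d => d.1))) := by
          simp only [List.filterMap_cons]
          refine (List.perm_append_comm).trans ?_
          simp only [List.singleton_append]
          exact (List.reverse_perm _).cons n
        simp only [pvStepA, if_pos h, hseg, List.takeWhile_cons, hn]
        refine Prod.ext ?_ (by simp)
        simp only [pvEvaluate_eq ch h, pvEvalB_perm ch hp]
        exact add_comm _ _
      | none =>
        have hp : ((((cs.takeWhile pvNop).filterMap (fun d => d.1)).reverse).Perm
            (((none, ch) :: cs.takeWhile pvNop).filterMap (fun d => d.1))) := by
          simp only [List.filterMap_cons]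
          exact List.reverse_perm _
        simp only [pvStepA, if_pos h, hseg, List.takeWhile_cons, hn]
        refine Prod.ext ?_ (by simp)
        simp only [pvEvaluate_eq ch h, pvEvalB_perm ch hp]
        exact add_comm _ _
    · have hn : pvNop (n?, ch) = true := by
        unfold pvNop; simp only [not_or] at h; simp [h.1, h.2]
      have hseg : pvSegTot ((n?, ch) :: cs) = pvSegTot cs := by
        rw [pvSegTot, if_neg h]
      cases n? with
      | some n =>
        simp [pvStepA, h, hseg, hn]
      | none =>
        simp [pvStepA, h, hseg, hn]

-- the index shift of every position when a column is prepended
def pvShiftQ (q : (Nat × Char) × Nat) : (Nat × Char) × Nat := ((q.1.1 + 1, q.1.2), q.2 + 1)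

lemma pvTerm_shift (c : Option Int × Char) (cs : List (Option Int × Char))
    (q : (Nat × Char) × Nat) : pvTerm (c :: cs) (pvShiftQ q) = pvTerm cs q := by
  unfold pvTerm pvShiftQ
  simp [List.drop_succ_cons, Nat.succ_sub_succ]

lemma pvZip_shift (a : List (Nat × Char)) (b : List Nat) :
    (a.map (fun q => (q.1 + 1, q.2))).zip (b.map (fun j => j + 1))
      = (a.zip b).map pvShiftQ := by
  rw [List.zip_map]; rfl

lemma pvShiftSum (c : Option Int × Char) (cs : List (Option Int × Char))
    (ts : List ((Nat × Char) × Nat)) :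
    ((ts.map pvShiftQ).map (pvTerm (c :: cs))).sum = (ts.map (pvTerm cs)).sum := by
  rw [List.map_map]
  congr 1
  exact List.map_congr_left (fun q _ => pvTerm_shift c cs q)

-- B's segment sum computes pvSegTot
lemma pvPairSum_eq (cs : List (Option Int × Char)) : pvPairSum cs = pvSegTot cs := by
  induction cs with
  | nil => simp [pvPairSum, pvBounds, pvOps, pvSegTot]
  | cons c cs ih =>
    by_cases h : c.2 = '+' ∨ c.2 = '*'
    · -- segment head: c starts a segment ending at the next operator (or the end)
      have hseg : pvSegTot (c :: cs)
          = pvEvalB c.2 ((c :: cs.takeWhile pvNop).filterMap (fun d => d.1))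
            + pvSegTot cs := by
        rw [pvSegTot, if_pos h, pvSegTot_dropWhile]
      cases hops : pvOps cs with
      | nil =>
        have htw : cs.takeWhile pvNop = cs := by
          have := pvTake_first cs
          rw [hops] at this
          simpa using this.symm
        have hps : pvPairSum cs = 0 := by
          unfold pvPairSum; rw [hops]; simp
        unfold pvPairSum pvBounds
        simp only [pvOps, if_pos h, hops, List.map_cons, List.map_nil,
          List.drop_succ_cons, List.drop_nil, List.nil_append, List.zip_cons_cons,
          List.zip_nil_right, List.sum_cons, List.sum_nil, List.length_cons]
        rw [hseg, htw, ← ih, hps]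
        unfold pvTerm
        simp [List.take_succ_cons, List.take_length]
      | cons q qs =>
        have htw : cs.take q.1 = cs.takeWhile pvNop := by
          have := pvTake_first cs
          rw [hops] at this
          simpa using this
        unfold pvPairSum pvBounds
        simp only [pvOps, if_pos h, hops, List.map_cons, List.drop_succ_cons,
          List.drop_zero, List.length_cons, List.map_map]
        have hzip : ((q.1 + 1, q.2) :: qs.map (fun q => (q.1 + 1, q.2))).zip
              ((qs.map ((fun q => q.1) ∘ fun q => (q.1 + 1, q.2))) ++ [cs.length + 1])
            = ((q :: qs).zip (qs.map (fun q => q.1) ++ [cs.length])).map pvShiftQ := by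
          have h1 : qs.map ((fun q => q.1) ∘ fun q => (q.1 + 1, q.2))
              = (qs.map (fun q => q.1)).map (fun j => j + 1) := by
            simp [List.map_map]
          have h2 : (qs.map (fun q => q.1)).map (fun j => j + 1) ++ [cs.length + 1]
              = ((qs.map (fun q => q.1)) ++ [cs.length]).map (fun j => j + 1) := by
            simp
          rw [h1, h2,
            show ((q.1 + 1, q.2) :: qs.map (fun q => (q.1 + 1, q.2)))
              = (q :: qs).map (fun q => (q.1 + 1, q.2)) from rfl, pvZip_shift]
        simp only [List.cons_append, List.zip_cons_cons, List.map_cons, List.sum_cons]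
        rw [hzip, pvShiftSum]
        have htail : (((q :: qs).zip (qs.map (fun q => q.1) ++ [cs.length])).map
            (pvTerm cs)).sum = pvPairSum cs := by
          unfold pvPairSum pvBounds; rw [hops]; simp
        rw [htail, ih, hseg]
        congr 1
        unfold pvTerm
        simp only [Nat.sub_zero, List.drop_zero, List.take_succ_cons, htw]
    · -- c continues (or precedes) a segment: everything shifts by one
      have hseg : pvSegTot (c :: cs) = pvSegTot cs := by rw [pvSegTot, if_neg h]
      unfold pvPairSum pvBounds
      simp only [pvOps, if_neg h, List.length_cons, List.map_map]
      have h1 : ((pvOps cs).map ((fun q => q.1) ∘ fun q => (q.1 + 1, q.2))).drop 1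
            ++ [cs.length + 1]
          = (((pvOps cs).map (fun q => q.1)).drop 1 ++ [cs.length]).map (fun j => j + 1) := by
        have : (pvOps cs).map ((fun q => q.1) ∘ fun q => (q.1 + 1, q.2))
            = ((pvOps cs).map (fun q => q.1)).map (fun j => j + 1) := by
          simp [List.map_map]
        rw [this]
        simp
      rw [h1, pvZip_shift, pvShiftSum, hseg]
      exact ih

-- A's column expression (ranging over j) is B's direct map over the lines
lemma pvColA_eq (lines : List String) (i : Int) :
    (PySem.List.pyRange 0 (lines.length : Int) 1).map
      (fun j => PySem.List.pyGetD (PySem.List.pyGetD lines j "").toList i ' ')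
    = lines.map (fun line => PySem.List.pyGetD line.toList i ' ') := by
  conv_rhs => rw [← PySem.List.map_pyGetD_pyRange_zero' lines ""]
  rw [List.map_map]
  rfl

-- A's loop body (with the column list rewritten by pvColA_eq) is pvStepA on the parsed column
lemma pvBodyA_eq (lines : List String) :
    (fun (st : Int × List Int) (i : Int) =>
      let col : List Char := (PySem.List.pyRange 0 (lines.length : Int) 1).map
        (fun j => PySem.List.pyGetD (PySem.List.pyGetD lines j "").toList i ' ')
      let digits : List Char := col.filter (fun c => PySem.Chars.isdigit c)
      let buffer : List Int :=
        if digits ≠ [] then st.2 ++ [(PySem.Int.ofChars? digits).getD 0] else st.2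
      let last : Char := PySem.List.pyGetD col (-1) ' '
      if last = '+' ∨ last = '*' then (st.1 + pvEvaluate last buffer, ([] : List Int))
      else (st.1, buffer))
      = fun st i => pvStepA st (pvColInfo lines i) := by
  funext st i
  rw [pvColA_eq]
  simp only [pvStepA, pvColInfo]
  split_ifs with h <;> simp

-- A's whole loop computes the segment total
lemma pvA_to_seg (lines : List String) (l : Int) :
    (((PySem.List.pyRange 0 l 1).reverse).foldl
      (fun (st : Int × List Int) (i : Int) =>
        let col : List Char := (PySem.List.pyRange 0 (lines.length : Int) 1).map
          (fun j => PySem.List.pyGetD (PySem.List.pyGetD lines j "").toList i ' ')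
        let digits : List Char := col.filter (fun c => PySem.Chars.isdigit c)
        let buffer : List Int :=
          if digits ≠ [] then st.2 ++ [(PySem.Int.ofChars? digits).getD 0] else st.2
        let last : Char := PySem.List.pyGetD col (-1) ' '
        if last = '+' ∨ last = '*' then (st.1 + pvEvaluate last buffer, ([] : List Int))
        else (st.1, buffer))
      ((0 : Int), ([] : List Int))).1
    = pvSegTot ((PySem.List.pyRange 0 l 1).map (pvColInfo lines)) := by
  rw [pvBodyA_eq lines, List.foldl_reverse]
  have h1 : ((PySem.List.pyRange 0 l 1).map (pvColInfo lines)).foldr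
        (fun c st => pvStepA st c) ((0 : Int), ([] : List Int))
      = (PySem.List.pyRange 0 l 1).foldr
        (fun x y => pvStepA y (pvColInfo lines x)) ((0 : Int), ([] : List Int)) :=
    List.foldr_map ..
  exact congrArg Prod.fst (h1.symm.trans (pvFoldrA _))

-- B's operator scan, at any enumeration offset, is pvOps with shifted positions
lemma pvOpsInt (cs : List (Option Int × Char)) (s : Nat) :
    (PySem.List.enumerate cs (s : Int)).filterMap
        (fun p => if p.2.2 = '+' ∨ p.2.2 = '*' then some (p.1, p.2.2) else none)
      = (pvOps cs).map (fun q => (((s + q.1 : Nat) : Int), q.2)) := by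
  induction cs generalizing s with
  | nil => simp [PySem.List.enumerate_nil, pvOps]
  | cons c cs ih =>
    rw [PySem.List.enumerate_cons, List.filterMap_cons]
    have hs1 : ((s : Int) + 1) = ((s + 1 : Nat) : Int) := by push_cast; ring
    by_cases h : c.2 = '+' ∨ c.2 = '*'
    · simp only [if_pos h, pvOps, hs1, ih (s + 1), List.map_cons, List.map_map]
      refine congrArg₂ _ (by simp) ?_
      exact List.map_congr_left (fun q _ => by simp; omega)
    · simp only [if_neg h, pvOps, hs1, ih (s + 1), List.map_map]
      exact List.map_congr_left (fun q _ => by simp; omega)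

-- B's whole fold computes the pair sum
lemma pvB_to_pair (cols : List (Option Int × Char)) :
    ((((PySem.List.enumerate cols 0).filterMap
        (fun p => if p.2.2 = '+' ∨ p.2.2 = '*' then some (p.1, p.2.2) else none)).zip
      ((((PySem.List.enumerate cols 0).filterMap
        (fun p => if p.2.2 = '+' ∨ p.2.2 = '*' then some (p.1, p.2.2) else none)).map
          (fun q => q.1)).drop 1 ++ [(cols.length : Int)])).foldl
      (fun (total : Int) (q : (Int × Char) × Int) =>
        if q.1.2 = '+' then
          total + ((PySem.List.slice cols (some q.1.1) (some q.2)).filterMap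
            (fun c => c.1)).sum
        else
          total + ((PySem.List.slice cols (some q.1.1) (some q.2)).filterMap
            (fun c => c.1)).foldl (fun prod n => prod * n) 1) 0)
    = pvPairSum cols := by
  have h0 : (PySem.List.enumerate cols 0).filterMap
        (fun p => if p.2.2 = '+' ∨ p.2.2 = '*' then some (p.1, p.2.2) else none)
      = (pvOps cols).map (fun q => ((q.1 : Int), q.2)) := by
    have := pvOpsInt cols 0
    simpa using this
  rw [h0]
  have hstarts : (((pvOps cols).map (fun q => ((q.1 : Int), q.2))).map (fun q => q.1)).drop 1
        ++ [(cols.length : Int)]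
      = (pvBounds cols).map (fun n : Nat => (n : Int)) := by
    unfold pvBounds
    rw [List.map_map, List.map_append]
    congr 1
    rw [List.map_drop, List.map_map]
    exact congrArg (List.drop 1) (List.map_congr_left (fun q _ => rfl))
  rw [hstarts, List.zip_map]
  have hbody : (fun (total : Int) (q : (Int × Char) × Int) =>
        if q.1.2 = '+' then
          total + ((PySem.List.slice cols (some q.1.1) (some q.2)).filterMap
            (fun c => c.1)).sum
        else
          total + ((PySem.List.slice cols (some q.1.1) (some q.2)).filterMap
            (fun c => c.1)).foldl (fun prod n => prod * n) 1)
      = (fun (total : Int) (q : (Int × Char) × Int) =>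
        total + (if q.1.2 = '+' then
          ((PySem.List.slice cols (some q.1.1) (some q.2)).filterMap (fun c => c.1)).sum
        else
          ((PySem.List.slice cols (some q.1.1) (some q.2)).filterMap
            (fun c => c.1)).foldl (fun prod n => prod * n) 1)) := by
    funext total q
    by_cases h : q.1.2 = '+' <;> simp [h]
  rw [hbody, PySem.List.foldl_add, zero_add]
  unfold pvPairSum
  rw [List.map_map]
  congr 1
  refine List.map_congr_left (fun q _ => ?_)
  show (if q.1.2 = '+' then
      ((PySem.List.slice cols (some ((q.1.1 : Nat) : Int))
        (some ((q.2 : Nat) : Int))).filterMap (fun c => c.1)).sum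
    else
      ((PySem.List.slice cols (some ((q.1.1 : Nat) : Int))
        (some ((q.2 : Nat) : Int))).filterMap
          (fun c => c.1)).foldl (fun prod n => prod * n) 1)
    = pvTerm cols q
  rw [PySem.List.slice_natCast]
  unfold pvTerm pvEvalB
  by_cases h : q.1.2 = '+' <;> simp [h, pvFoldProd]

-- ===== VERDICT (by name: the statement is the Claim_ definition above) =====
theorem part_two_spec : Claim_equal_part_two := by
  intro input _hdom _hpre
  show part_two input = part_two_alt input
  exact (pvA_to_seg (PySem.Str.splitlines input)
      (PySem.Str.len (PySem.List.pyGetD (PySem.Str.splitlines input) 0 ""))).trans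
    ((pvPairSum_eq _).symm.trans (pvB_to_pair _).symm)
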